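-- pv_equiv track=rewrite | github.com/Paulo-Filipe/earlycoding | iteration.py | count_to_sam
-- ===== SOURCE A (Python) =====
-- def count_to_sam(lista):
--     cota = 0
--     for i in lista:
--         if i == "sam":
--             cota += 1
--             break
--         elif i != "sam":
--             cota += 1
--         else:
--             continue
--     return cota
-- ===== SOURCE B (Python) =====
-- def count_to_sam(lista):
--     # Backward fold: scanning right-to-left, a "sam" resets the running
--     # count to 1; otherwise it grows by 1.  After the full pass the count
--     # equals the position of the FIRST "sam" plus one (else the length).
--     cnt = 0
--     for x in reversed(list(lista)):
--         cnt = 1 if x == "sam" else cnt + 1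
--     return cnt
-- ===== Notes on version B (the rewrite author's own statement) =====
-- stated objective: alternative
-- what changed: Replaced the forward break-on-match counting loop by a full right-to-left fold whose accumulator resets to 1 at every "sam", so the leftmost "sam" determines the final count.
import Mathlib
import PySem

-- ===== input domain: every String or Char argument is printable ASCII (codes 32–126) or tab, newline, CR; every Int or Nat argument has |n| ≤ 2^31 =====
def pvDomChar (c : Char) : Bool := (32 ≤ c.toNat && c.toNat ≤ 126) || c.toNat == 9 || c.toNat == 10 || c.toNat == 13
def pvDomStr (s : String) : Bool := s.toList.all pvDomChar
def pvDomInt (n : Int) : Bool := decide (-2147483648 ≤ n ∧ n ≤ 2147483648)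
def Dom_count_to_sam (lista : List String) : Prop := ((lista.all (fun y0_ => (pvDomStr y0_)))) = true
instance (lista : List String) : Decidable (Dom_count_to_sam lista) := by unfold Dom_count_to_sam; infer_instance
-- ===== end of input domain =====

-- ===== PORT A =====
-- B replaces A's forward break-on-match counting loop by a full backward fold
-- whose accumulator resets to 1 at every "sam"; return values are equal on all inputs.
def countToSamGo (lista : List String) (cota : Int) : Int :=
  match lista with
  | [] => cota
  | i :: rest => if i == "sam" then cota + 1 else countToSamGo rest (cota + 1)

def count_to_sam (lista : List String) : Int := countToSamGo lista 0

-- ===== PORT B =====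
def count_to_sam_alt (lista : List String) : Int :=
  lista.reverse.foldl (fun cnt x => if x == "sam" then 1 else cnt + 1) 0

-- ===== PRECONDITION & SPEC =====
def Spec_count_to_sam (lista : List String) (out : Int) : Prop := out = count_to_sam_alt lista
instance (lista : List String) (out : Int) : Decidable (Spec_count_to_sam lista out) := by unfold Spec_count_to_sam; infer_instance

-- ===== CLAIM (what is proved, stated in full; the proofs are below) =====
def Claim_equal_count_to_sam : Prop := ∀ (lista : List String), Dom_count_to_sam lista → Spec_count_to_sam lista (count_to_sam lista)

-- ===== LEMMAS AND PROOFS =====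

-- ===== VERDICT (by name: the statement is the Claim_ definition above) =====
-- B as a foldr over the original list (foldl over the reverse = foldr).
lemma alt_foldr (lista : List String) :
    count_to_sam_alt lista
      = lista.foldr (fun x cnt => if x == "sam" then 1 else cnt + 1) 0 := by
  simp [count_to_sam_alt, List.foldl_reverse]

lemma countToSamGo_eq (lista : List String) (c : Int) :
    countToSamGo lista c = c + count_to_sam_alt lista := by
  induction lista generalizing c with
  | nil => simp [countToSamGo, count_to_sam_alt]
  | cons i rest ih =>
    rw [alt_foldr, List.foldr_cons, ← alt_foldr, countToSamGo]
    by_cases h : i = "sam"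
    · simp [h]
    · rw [if_neg (by simpa using h), if_neg (by simpa using h), ih]
      ring

theorem count_to_sam_spec : Claim_equal_count_to_sam := by
  intro lista _
  show count_to_sam lista = count_to_sam_alt lista
  rw [count_to_sam, countToSamGo_eq, zero_add]
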